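-- pv_equiv track=rewrite | github.com/suphair/speedcubingextraevents.org | Script/kilosolver.py | comb_to_index
-- ===== SOURCE A (Python) =====
-- def C(n, k):
--     if k < 0 or k > n:
--         return 0
--     if k == 0 or k == n:
--         return 1
--     c = 1
--     for i in range(k):
--         c = c * (n - i) // (i + 1)
--     return c
--
-- def comb_to_index(l):
--     """Represent a list of bits (big-endian) as an index among all lists with the same sum."""
--     bits = len(l)
--     ones = sum(l)
--     zeros = bits-ones
--     if zeros == 0 or ones == 0 or bits == 1:
--         return 0
--     b = C(bits-1,ones)
--     ind = 0
--     while zeros > 0 and ones > 0 and bits > 1: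
--         bits -= 1
--         if l[0] == 0:
--             zeros -= 1
--             b = b*zeros//bits
--         else:
--             ind += b
--             b = b*ones//bits
--             ones -=1
--         l = l[1:]
--     return ind
-- ===== SOURCE B (Python) =====
-- def C(n, k):
--     if k < 0 or k > n:
--         return 0
--     if k == 0 or k == n:
--         return 1
--     c = 1
--     for i in range(k):
--         c = c * (n - i) // (i + 1)
--     return c
--
-- def comb_to_index(l):
--     """Represent a list of bits (big-endian) as an index among all lists with the same sum."""
--     ones = sum(l)
--     remaining = len(l)
--     ind = 0
--     for x in l:
--         if ones == 0:
--             break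
--         remaining -= 1
--         if x:
--             ind += C(remaining, ones)
--             ones -= 1
--     return ind
-- ===== Notes on version B (the rewrite author's own statement) =====
-- stated objective: simpler
-- what changed: B drops A's incrementally maintained running binomial b (updated with floor divisions each step) and A's zeros counter and list slicing; instead it makes one pass over the elements with a position counter, adding a freshly computed C(remaining, ones) at each set bit and breaking when ones reaches 0.
import Mathlib
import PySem

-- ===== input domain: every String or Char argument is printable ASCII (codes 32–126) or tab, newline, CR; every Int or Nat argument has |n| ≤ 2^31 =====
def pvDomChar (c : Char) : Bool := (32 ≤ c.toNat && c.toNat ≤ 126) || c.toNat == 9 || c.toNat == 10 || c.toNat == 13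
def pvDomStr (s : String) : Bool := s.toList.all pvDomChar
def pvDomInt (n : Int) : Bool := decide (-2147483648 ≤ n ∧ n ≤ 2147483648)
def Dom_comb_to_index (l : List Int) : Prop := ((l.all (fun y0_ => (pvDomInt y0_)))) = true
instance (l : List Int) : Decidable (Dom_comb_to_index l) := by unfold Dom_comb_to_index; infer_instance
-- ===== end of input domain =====

-- B replaces A's incrementally maintained binomial b / zeros counter / list slicing by a single
-- pass that adds a freshly recomputed C(remaining, ones) at each set bit (objective: simpler).

-- ===== PORT A =====
-- helper C(n, k), shared verbatim by both Python versions
def pyC (n k : Int) : Int :=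
  if k < 0 ∨ k > n then 0
  else if k = 0 ∨ k = n then 1
  else (PySem.List.pyRange 0 k 1).foldl (fun c i => PySem.Int.floordiv (c * (n - i)) (i + 1)) 1

-- A's while-loop; the [] case is unreachable from comb_to_index (bits always equals the list length)
def combLoopA : List Int → Int → Int → Int → Int → Int → Int
  | [], _bits, _ones, _zeros, _b, ind => ind
  | x :: rest, bits, ones, zeros, b, ind =>
    if zeros > 0 ∧ ones > 0 ∧ bits > 1 then
      if x = 0 then
        combLoopA rest (bits - 1) ones (zeros - 1)
          (PySem.Int.floordiv (b * (zeros - 1)) (bits - 1)) ind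
      else
        combLoopA rest (bits - 1) (ones - 1) zeros
          (PySem.Int.floordiv (b * ones) (bits - 1)) (ind + b)
    else ind

def comb_to_index (l : List Int) : Int :=
  let bits : Int := l.length
  let ones : Int := l.sum
  let zeros : Int := bits - ones
  if zeros = 0 ∨ ones = 0 ∨ bits = 1 then 0
  else combLoopA l bits ones zeros (pyC (bits - 1) ones) 0

-- ===== PORT B =====
def combLoopB : List Int → Int → Int → Int → Int
  | [], _remaining, _ones, ind => ind
  | x :: rest, remaining, ones, ind =>
    if ones = 0 then ind
    else if x ≠ 0 then
      combLoopB rest (remaining - 1) (ones - 1) (ind + pyC (remaining - 1) ones)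
    else
      combLoopB rest (remaining - 1) ones ind

def comb_to_index_alt (l : List Int) : Int :=
  combLoopB l l.length l.sum 0

-- ===== PRECONDITION & SPEC =====
def Spec_comb_to_index (l : List Int) (out : Int) : Prop := out = comb_to_index_alt l
instance (l : List Int) (out : Int) : Decidable (Spec_comb_to_index l out) := by unfold Spec_comb_to_index; infer_instance

-- ===== CLAIM (what is proved, stated in full; the proofs are below) =====
def Claim_equal_comb_to_index : Prop := ∀ (l : List Int), Dom_comb_to_index l → Spec_comb_to_index l (comb_to_index l)

-- ===== LEMMAS AND PROOFS =====

lemma pyC_neg (n k : Int) (h : k < 0) : pyC n k = 0 := by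
  simp [pyC, h]

lemma pyC_gt (n k : Int) (h : n < k) : pyC n k = 0 := by
  simp [pyC, h]

lemma pyC_fold (n : Nat) : ∀ (j : Nat), j ≤ n →
    (PySem.List.pyRange 0 (j : Int) 1).foldl
      (fun c i => PySem.Int.floordiv (c * ((n : Int) - i)) (i + 1)) 1 = (n.choose j : Int) := by
  intro j
  induction j with
  | zero => intro _; simp [PySem.List.pyRange_one_eq_nil]
  | succ j ih =>
    intro hj
    have hcast : ((j + 1 : Nat) : Int) = (j : Int) + 1 := by push_cast; ring
    rw [hcast, PySem.List.pyRange_one_succ_right (by positivity), List.foldl_append,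
      ih (Nat.le_of_succ_le hj)]
    have hnj : ((n : Int) - (j : Int)) = ((n - j : Nat) : Int) := by
      omega
    simp only [List.foldl, hnj]
    have h1 : (n.choose j : Int) * ((n - j : Nat) : Int) = ((n.choose j * (n - j) : Nat) : Int) := by
      push_cast; ring
    rw [h1, ← Nat.choose_succ_right_eq]
    have h2 : ((j : Int) + 1) = ((j + 1 : Nat) : Int) := by push_cast; ring
    rw [h2, PySem.Int.floordiv_natCast, Nat.mul_div_cancel _ (Nat.succ_pos j)]

lemma pyC_eq_choose (n k : Nat) (h : k ≤ n) : pyC (n : Int) (k : Int) = (n.choose k : Int) := by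
  unfold pyC
  have h1 : ¬ ((k : Int) < 0 ∨ (k : Int) > (n : Int)) := by omega
  rw [if_neg h1]
  by_cases h2 : (k : Int) = 0 ∨ (k : Int) = (n : Int)
  · rw [if_pos h2]
    rcases h2 with h2 | h2
    · have : k = 0 := by omega
      simp [this]
    · have : k = n := by omega
      simp [this]
  · rw [if_neg h2]
    exact pyC_fold n k h

lemma b_zero_step (n k : Nat) (h1 : 1 ≤ k) (h2 : k ≤ n) :
    PySem.Int.floordiv (pyC (n : Int) (k : Int) * ((n : Int) - (k : Int))) (n : Int)
      = pyC ((n : Int) - 1) (k : Int) := by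
  rcases Nat.lt_or_ge k n with hlt | hge
  · -- k < n : both sides are binomials
    have hn1 : ((n : Int) - 1) = ((n - 1 : Nat) : Int) := by omega
    rw [pyC_eq_choose n k h2, hn1, pyC_eq_choose (n - 1) k (by omega)]
    have key : n.choose k * (n - k) = n * (n - 1).choose k := by
      have e1 := Nat.choose_succ_right_eq n k
      have e2 := Nat.add_one_mul_choose_eq (n - 1) k
      have hn : n - 1 + 1 = n := by omega
      simp only [hn] at e2
      omega
    have hc : (n.choose k : Int) * ((n : Int) - (k : Int))
        = ((n * (n - 1).choose k : Nat) : Int) := by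
      rw [← key]
      push_cast [Nat.cast_sub h2]
      ring
    rw [hc, PySem.Int.floordiv_natCast, Nat.mul_div_cancel_left _ (by omega : 0 < n)]
  · -- k = n : LHS multiplies by 0, RHS is C(n-1, n) = 0
    have hk : k = n := by omega
    subst hk
    have hz : ((k : Int) - (k : Int)) = 0 := by ring
    have hr : pyC ((k : Int) - 1) (k : Int) = 0 := pyC_gt _ _ (by omega)
    rw [hz, mul_zero, hr]
    simp [PySem.Int.floordiv]

lemma b_one_step (n k : Nat) (h1 : 1 ≤ k) (h2 : k ≤ n) :
    PySem.Int.floordiv (pyC (n : Int) (k : Int) * (k : Int)) (n : Int)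
      = pyC ((n : Int) - 1) ((k : Int) - 1) := by
  have hn : 1 ≤ n := le_trans h1 h2
  have hn1 : ((n : Int) - 1) = ((n - 1 : Nat) : Int) := by omega
  have hk1 : ((k : Int) - 1) = ((k - 1 : Nat) : Int) := by omega
  rw [pyC_eq_choose n k h2, hn1, hk1, pyC_eq_choose (n - 1) (k - 1) (by omega)]
  have key : n.choose k * k = n * (n - 1).choose (k - 1) := by
    have e2 := Nat.add_one_mul_choose_eq (n - 1) (k - 1)
    have hn' : n - 1 + 1 = n := by omega
    have hk' : k - 1 + 1 = k := by omega
    simp only [hn', hk'] at e2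
    omega
  have hc : (n.choose k : Int) * (k : Int) = ((n * (n - 1).choose (k - 1) : Nat) : Int) := by
    rw [← key]; push_cast; ring
  rw [hc, PySem.Int.floordiv_natCast, Nat.mul_div_cancel_left _ (by omega : 0 < n)]

lemma loopB_zero (l : List Int) (r ind : Int) : combLoopB l r 0 ind = ind := by
  cases l with
  | nil => rfl
  | cons x rest => simp [combLoopB]

lemma loopB_neg : ∀ (l : List Int) (r ones ind : Int), ones < 0 → combLoopB l r ones ind = ind := by
  intro l
  induction l with
  | nil => intro r ones ind _; rfl
  | cons x rest ih =>
    intro r ones ind h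
    simp only [combLoopB]
    rw [if_neg (by omega : ¬ ones = 0)]
    by_cases hx : x ≠ 0
    · rw [if_pos hx, pyC_neg _ _ h, add_zero, ih _ _ _ (by omega)]
    · rw [if_neg hx, ih _ _ _ h]

lemma loopB_ge : ∀ (l : List Int) (ones ind : Int), (l.length : Int) ≤ ones →
    combLoopB l (l.length : Int) ones ind = ind := by
  intro l
  induction l with
  | nil => intro ones ind _; rfl
  | cons x rest ih =>
    intro ones ind h
    simp only [List.length_cons] at h
    push_cast at h
    simp only [combLoopB, List.length_cons]
    have hlen : (((rest.length + 1 : Nat)) : Int) - 1 = (rest.length : Int) := by push_cast; ring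
    rw [if_neg (by omega : ¬ ones = 0), hlen]
    by_cases hx : x ≠ 0
    · rw [if_pos hx, pyC_gt _ _ (by omega), add_zero, ih _ _ (by omega)]
    · rw [if_neg hx, ih _ _ (by omega)]

lemma loopAB : ∀ (l : List Int) (ones ind : Int),
    combLoopA l (l.length : Int) ones ((l.length : Int) - ones) (pyC ((l.length : Int) - 1) ones) ind
      = combLoopB l (l.length : Int) ones ind := by
  intro l
  induction l with
  | nil =>
    intro ones ind
    rfl
  | cons x rest ih =>
    intro ones ind
    simp only [combLoopA, combLoopB, List.length_cons]
    have hlen : (((rest.length + 1 : Nat)) : Int) - 1 = (rest.length : Int) := by push_cast; ring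
    set n : Nat := rest.length with hn
    by_cases h0 : ones = 0
    · rw [if_neg (by omega), if_pos h0]
    · rw [if_neg h0]
      rcases lt_trichotomy ones 0 with hneg | hz | hpos
      · -- negative ones: A's guard fails, B adds only zeros
        rw [if_neg (by omega)]
        by_cases hx : x ≠ 0
        · rw [if_pos hx, pyC_neg _ _ hneg, add_zero, loopB_neg _ _ _ _ (by omega)]
        · rw [if_neg hx, loopB_neg _ _ _ _ hneg]
      · omega
      · rcases Nat.lt_or_ge n ones.toNat with hge | hlt
        · -- ones ≥ length: A's zeros ≤ 0, B's additions are all C(k>n) = 0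
          rw [if_neg (by omega)]
          by_cases hx : x ≠ 0
          · rw [if_pos hx, pyC_gt _ _ (by rw [hlen]; omega), add_zero, hlen,
              loopB_ge _ _ _ (by omega)]
          · rw [if_neg hx, hlen, loopB_ge _ _ _ (by omega)]
        · -- 1 ≤ ones ≤ n : the real loop step
          have hk : ones = (ones.toNat : Int) := by omega
          set k : Nat := ones.toNat with hkk
          have hk1 : 1 ≤ k := by omega
          have hk2 : k ≤ n := hlt
          rw [if_pos (by push_cast; omega)]
          by_cases hx : x = 0
          · rw [if_pos hx, if_neg (by simpa using hx)]
            have hb : PySem.Int.floordiv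
                (pyC ((((n + 1 : Nat)) : Int) - 1) ones * ((((n + 1 : Nat)) : Int) - ones - 1))
                ((((n + 1 : Nat)) : Int) - 1) = pyC ((n : Int) - 1) ones := by
              rw [hlen, hk]
              have harg : ((n : Int) - (k : Int)) = (((n + 1 : Nat)) : Int) - (k : Int) - 1 := by
                push_cast; ring
              rw [← harg]
              exact b_zero_step n k hk1 hk2
            rw [hb, hlen]
            have hz : (((n + 1 : Nat)) : Int) - ones - 1 = (n : Int) - ones := by push_cast; ring
            rw [hz]
            exact ih ones ind
          · rw [if_neg hx, if_pos (by simpa using hx)]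
            have hb : PySem.Int.floordiv (pyC ((((n + 1 : Nat)) : Int) - 1) ones * ones)
                ((((n + 1 : Nat)) : Int) - 1) = pyC ((n : Int) - 1) (ones - 1) := by
              rw [hlen, hk]
              exact b_one_step n k hk1 hk2
            have hz : (((n + 1 : Nat)) : Int) - ones = (n : Int) - (ones - 1) := by push_cast; ring
            rw [hb, hlen, hz]
            exact ih (ones - 1) (ind + pyC ((n : Int)) ones)

-- ===== VERDICT (by name: the statement is the Claim_ definition above) =====
theorem comb_to_index_spec : Claim_equal_comb_to_index := by
  intro l _
  unfold Spec_comb_to_index comb_to_index comb_to_index_alt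
  simp only []
  by_cases hg : (l.length : Int) - l.sum = 0 ∨ l.sum = 0 ∨ (l.length : Int) = 1
  · rw [if_pos hg]
    rcases hg with hz | ho | hb
    · rw [loopB_ge l l.sum 0 (by omega)]
    · rw [ho, loopB_zero]
    · -- singleton list
      have hlen : l.length = 1 := by omega
      rcases lt_trichotomy l.sum 0 with h | h | h
      · rw [loopB_neg _ _ _ _ h]
      · rw [h, loopB_zero]
      · rw [loopB_ge l l.sum 0 (by omega)]
  · rw [if_neg hg]
    exact loopAB l l.sum 0
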